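-- pv_equiv track=rewrite | github.com/KevinMateoG/Practica-de-recursividad-1 | modelo-prueba.py | buscar_posiciones_libres
-- ===== SOURCE A (Python) =====
-- def buscar_posiciones_libres(matriz, i: int = 0, j: int = 0, cont: int = 0) -> list[tuple]:
--     lista = []
--     limite = len(matriz) * len(matriz)
--
--     if limite == cont:
--         return lista
--
--     if j == len(matriz):
--         return buscar_posiciones_libres(matriz, i+1, 0, cont)
--
--     if matriz[i][j] == "_":
--         posicion = (i, j)
--         lista.append(posicion)
--
--     return lista + buscar_posiciones_libres(matriz, i, j+1,cont+1)
-- ===== SOURCE B (Python) =====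
-- def buscar_posiciones_libres(matriz, i: int = 0, j: int = 0, cont: int = 0) -> list[tuple]:
--     n = len(matriz)
--     libres = []
--     for _ in range(n * n - cont):
--         if j == n:
--             i, j = i + 1, 0
--         if matriz[i][j] == "_":
--             libres.append((i, j))
--         j += 1
--     return libres
-- ===== Notes on version B (the rewrite author's own statement) =====
-- stated objective: simpler
-- what changed: Replaces A's recursion (one call per cell, building the result by repeated list concatenation) with a single iterative loop over the remaining cell count that advances an (i, j) cursor and appends to one accumulator list, with no recursion depth limit.
import Mathlib
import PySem

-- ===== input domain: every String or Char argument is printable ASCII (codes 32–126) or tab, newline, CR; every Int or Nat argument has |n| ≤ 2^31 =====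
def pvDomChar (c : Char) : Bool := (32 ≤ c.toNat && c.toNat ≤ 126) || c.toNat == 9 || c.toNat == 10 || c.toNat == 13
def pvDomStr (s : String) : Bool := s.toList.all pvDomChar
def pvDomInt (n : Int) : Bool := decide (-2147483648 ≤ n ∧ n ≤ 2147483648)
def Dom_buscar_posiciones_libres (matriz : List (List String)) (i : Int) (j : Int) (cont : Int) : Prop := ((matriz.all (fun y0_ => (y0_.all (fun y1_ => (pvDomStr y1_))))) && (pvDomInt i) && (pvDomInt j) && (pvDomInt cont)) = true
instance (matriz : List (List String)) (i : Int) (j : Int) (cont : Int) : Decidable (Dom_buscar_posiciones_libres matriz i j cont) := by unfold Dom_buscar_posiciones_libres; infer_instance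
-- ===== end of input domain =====

-- B replaces A's per-cell recursion (with list concatenation at every level) by one
-- iterative loop advancing an (i, j) cursor and appending to an accumulator (objective: simpler).

-- ===== PORT A =====
-- A's recursion has no structural measure (it diverges for cont > n*n), so the literal
-- transliteration carries a fuel parameter; the fuel 2*(n*n - cont) + 2 bounds the real
-- recursion depth on every input admitted by Pre_ below.
def buscar_posiciones_libres_go (matriz : List (List String)) (i : Int) (j : Int) (cont : Int) : Nat → List (Int × Int)
  | 0 => []
  | fuel + 1 =>
    let lista : List (Int × Int) := []
    let limite : Int := (matriz.length : Int) * (matriz.length : Int)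
    if limite = cont then lista
    else if j = (matriz.length : Int) then buscar_posiciones_libres_go matriz (i+1) 0 cont fuel
    else
      -- matriz[i][j] with Python indexing; none (= IndexError) only outside Pre_
      let cell := (PySem.List.pyGet? matriz i).bind (fun row => PySem.List.pyGet? row j)
      let lista := if cell = some "_" then lista ++ [(i, j)] else lista
      lista ++ buscar_posiciones_libres_go matriz i (j+1) (cont+1) fuel

def buscar_posiciones_libres (matriz : List (List String)) (i : Int) (j : Int) (cont : Int) : List (Int × Int) :=
  buscar_posiciones_libres_go matriz i j cont (2 * (((matriz.length : Int) * matriz.length - cont).toNat) + 2)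

-- ===== PORT B =====
-- body of Source B's for-loop (the loop variable is unused, as in `for _ in range(...)`)
def buscar_posiciones_libres_step (matriz : List (List String)) (st : Int × Int × List (Int × Int)) (_t : Int) : Int × Int × List (Int × Int) :=
  let n : Int := matriz.length
  let i := if st.2.1 = n then st.1 + 1 else st.1
  let j := if st.2.1 = n then 0 else st.2.1
  let libres :=
    if (PySem.List.pyGet? matriz i).bind (fun row => PySem.List.pyGet? row j) = some "_" then
      st.2.2 ++ [(i, j)]
    else st.2.2
  (i, j + 1, libres)

def buscar_posiciones_libres_alt (matriz : List (List String)) (i : Int) (j : Int) (cont : Int) : List (Int × Int) :=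
  let n : Int := matriz.length
  ((PySem.List.pyRange 0 (n * n - cont) 1).foldl (buscar_posiciones_libres_step matriz) (i, j, [])).2.2

-- ===== PRECONDITION & SPEC =====
-- the remaining n*n - cont cells of the row-major walk from (i, j) all lie at valid Python
-- index pairs of matriz (arithmetic bounds only; the row quantifier is capped to at most
-- 2n rows, which is no restriction under the surrounding bounds)
def pvWalkOk_buscar_posiciones_libres (matriz : List (List String)) (i : Int) (j : Int) (cont : Int) : Prop :=
  let n : Int := matriz.length
  let k := n * n - cont
  let i0 := if j = n then i + 1 else i
  let j0 := if j = n then (0 : Int) else j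
  let L0 : Int := (PySem.List.pyGetD matriz i0 []).length
  let q := PySem.Int.floordiv (k - (n - j0) - 1) n;
  -n ≤ i0 ∧ i0 < n ∧
  (if n < j0 ∨ k ≤ n - j0 then
     -- the walk never leaves row i0: columns j0 .. j0+k-1
     -L0 ≤ j0 ∧ j0 + k ≤ L0
   else
     -- row i0 from column j0 to the end, then q full rows, then the first
     -- (k-(n-j0)-1) mod n + 1 cells of row i0+1+q
     -L0 ≤ j0 ∧ n ≤ L0 ∧ i0 + 1 + q < n ∧
     (∀ r ∈ PySem.List.pyRange (max (i0 + 1) (-n)) (min (i0 + 1 + q) n) 1,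
        n ≤ ((PySem.List.pyGetD matriz r []).length : Int)) ∧
     PySem.Int.mod (k - (n - j0) - 1) n
       < ((PySem.List.pyGetD matriz (i0 + 1 + q) []).length : Int))

-- Pre_ is exactly the set of inputs on which A returns (elsewhere A raises IndexError or
-- recurses forever): either cont already equals n*n, or all remaining cells of the walk are valid.
def Pre_buscar_posiciones_libres (matriz : List (List String)) (i : Int) (j : Int) (cont : Int) : Prop :=
  cont = (matriz.length : Int) * matriz.length ∨
    (matriz ≠ [] ∧ cont < (matriz.length : Int) * matriz.length ∧
     pvWalkOk_buscar_posiciones_libres matriz i j cont)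
instance (matriz : List (List String)) (i : Int) (j : Int) (cont : Int) : Decidable (Pre_buscar_posiciones_libres matriz i j cont) := by unfold Pre_buscar_posiciones_libres pvWalkOk_buscar_posiciones_libres; infer_instance

def pvWitness_buscar_posiciones_libres : List (List String) × Int × Int × Int := ([["_", "x"], ["x", "_"]], 0, 0, 0)

def Spec_buscar_posiciones_libres (matriz : List (List String)) (i : Int) (j : Int) (cont : Int) (out : List (Int × Int)) : Prop := out = buscar_posiciones_libres_alt matriz i j cont
instance (matriz : List (List String)) (i : Int) (j : Int) (cont : Int) (out : List (Int × Int)) : Decidable (Spec_buscar_posiciones_libres matriz i j cont out) := by unfold Spec_buscar_posiciones_libres; infer_instance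

-- ===== CLAIM (what is proved, stated in full; the proofs are below) =====
def Claim_equal_buscar_posiciones_libres : Prop := ∀ (matriz : List (List String)) (i : Int) (j : Int) (cont : Int), Dom_buscar_posiciones_libres matriz i j cont → Pre_buscar_posiciones_libres matriz i j cont → Spec_buscar_posiciones_libres matriz i j cont (buscar_posiciones_libres matriz i j cont)

-- ===== LEMMAS AND PROOFS =====

-- B's loop, recast as recursion on the iteration count, with the accumulator factored out
-- (the loop body ignores the loop variable)
def pvItb (matriz : List (List String)) : Nat → Int → Int → List (Int × Int)
  | 0, _i, _j => []
  | k + 1, i, j =>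
    let n : Int := matriz.length
    let i' := if j = n then i + 1 else i
    let j' := if j = n then 0 else j
    (if (PySem.List.pyGet? matriz i').bind (fun row => PySem.List.pyGet? row j') = some "_" then
        [(i', j')] else [])
      ++ pvItb matriz k i' (j' + 1)

lemma pvFoldl_itb (matriz : List (List String)) :
    ∀ (l : List Int) (i j : Int) (res : List (Int × Int)),
      (l.foldl (buscar_posiciones_libres_step matriz) (i, j, res)).2.2
        = res ++ pvItb matriz l.length i j := by
  intro l
  induction l with
  | nil => intro i j res; simp [pvItb]
  | cons x xs ih =>
    intro i j res
    simp only [List.foldl_cons, List.length_cons, pvItb, buscar_posiciones_libres_step]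
    rw [ih]
    split_ifs with h <;> simp

lemma pv_go_eq (matriz : List (List String)) (hn : matriz ≠ []) :
    ∀ (fuel : Nat) (i j cont : Int),
      cont ≤ (matriz.length : Int) * matriz.length →
      2 * (((matriz.length : Int) * matriz.length - cont).toNat)
        + (if j = (matriz.length : Int) then 2 else 1) ≤ fuel →
      buscar_posiciones_libres_go matriz i j cont fuel
        = pvItb matriz (((matriz.length : Int) * matriz.length - cont).toNat) i j := by
  have hnpos : 0 < (matriz.length : Int) := by
    have : matriz.length ≠ 0 := fun h => hn (List.length_eq_zero_iff.mp h)
    omega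
  have hz : ¬ ((0 : Int) = (matriz.length : Int)) := by omega
  intro fuel
  induction fuel with
  | zero => intro i j cont _ hf; split_ifs at hf <;> omega
  | succ fuel ih =>
    intro i j cont hle hf
    by_cases hdone : (matriz.length : Int) * matriz.length = cont
    · simp [buscar_posiciones_libres_go, hdone, pvItb]
    · have hlt : cont < (matriz.length : Int) * matriz.length :=
        lt_of_le_of_ne hle (fun h => hdone h.symm)
      have hk : ((matriz.length : Int) * matriz.length - cont).toNat
          = (((matriz.length : Int) * matriz.length - (cont + 1)).toNat) + 1 := by omega
      by_cases hjeq : j = (matriz.length : Int)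
      · -- row rollover: A recurses with (i+1, 0, cont); B's loop fuses the rollover with
        -- the next cell visit, so one pvItb step is unfolded on both sides
        have hgo : buscar_posiciones_libres_go matriz i j cont (fuel+1)
            = buscar_posiciones_libres_go matriz (i+1) 0 cont fuel := by
          simp [buscar_posiciones_libres_go, hdone, hjeq]
        rw [hgo, ih (i+1) 0 cont hle
          (by rw [if_pos hjeq] at hf; rw [if_neg hz]; omega)]
        rw [hk]
        simp [pvItb, hjeq, hz]
      · have hgo : buscar_posiciones_libres_go matriz i j cont (fuel+1)
            = (if (PySem.List.pyGet? matriz i).bind (fun row => PySem.List.pyGet? row j) = some "_"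
                then [(i, j)] else [])
              ++ buscar_posiciones_libres_go matriz i (j+1) (cont+1) fuel := by
          simp only [buscar_posiciones_libres_go, hdone, if_false, hjeq]
          split_ifs with h <;> simp
        rw [hgo, ih i (j+1) (cont+1) (by omega)
          (by rw [if_neg hjeq] at hf; split_ifs <;> omega)]
        rw [hk]
        simp [pvItb, hjeq]

-- ===== VERDICT (by name: the statement is the Claim_ definition above) =====
theorem buscar_posiciones_libres_spec : Claim_equal_buscar_posiciones_libres := by
  intro matriz i j cont _ hpre
  unfold Spec_buscar_posiciones_libres buscar_posiciones_libres buscar_posiciones_libres_alt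
  rw [pvFoldl_itb, PySem.List.length_pyRange_one, List.nil_append, sub_zero]
  rcases hpre with hdone | ⟨hne, hlt, _⟩
  · simp [buscar_posiciones_libres_go, hdone, pvItb]
  · rw [pv_go_eq matriz hne _ i j cont (le_of_lt hlt) (by split_ifs <;> omega)]
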